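-- pv_equiv track=rewrite | github.com/adarshukla3005/SearchEngine | search_engine/indexer/optimize_index.py | truncate_content_snippet
-- ===== SOURCE A (Python) =====
-- def truncate_content_snippet(snippet: str, max_chars: int = 200) -> str:
--     """
--     Truncate content snippet to a reasonable size (2-3 lines or max_chars)
--     """
--     if not snippet:
--         return ""
--
--     # Count up to 3 newlines or max_chars characters
--     end_pos = 0
--     newline_count = 0
--
--     for i, char in enumerate(snippet):
--         if char == '\n':
--             newline_count += 1
--             if newline_count >= 3:  # Limit to 3 lines
--                 end_pos = i
--                 break
--         if i >= max_chars:  # Maximum characters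
--             end_pos = i
--             break
--
--     # If we found a cutoff point, truncate the snippet
--     if end_pos > 0:
--         return snippet[:end_pos] + "..."
--     elif len(snippet) > max_chars:
--         return snippet[:max_chars] + "..."
--
--     return snippet
-- ===== SOURCE B (Python) =====
-- def truncate_content_snippet(snippet: str, max_chars: int = 200) -> str:
--     """
--     Truncate content snippet to a reasonable size (2-3 lines or max_chars)
--     """
--     if not snippet:
--         return ""
--
--     # Locate the third newline directly instead of scanning char-by-char.
--     p3 = -1
--     p1 = snippet.find('\n')
--     if p1 != -1:
--         p2 = snippet.find('\n', p1 + 1)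
--         if p2 != -1:
--             p3 = snippet.find('\n', p2 + 1)
--
--     if p3 != -1 and p3 <= max_chars:
--         return snippet[:p3] + "..."
--     if len(snippet) > max_chars:
--         return snippet[:max_chars] + "..."
--     return snippet
-- ===== Notes on version B (the rewrite author's own statement) =====
-- stated objective: simpler
-- what changed: Replaces A's char-by-char enumerate loop with its newline counter and break logic by three direct str.find calls that locate the third newline, then one condition deciding between the newline cut, the max_chars cut, or returning the snippet unchanged.
import Mathlib
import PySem

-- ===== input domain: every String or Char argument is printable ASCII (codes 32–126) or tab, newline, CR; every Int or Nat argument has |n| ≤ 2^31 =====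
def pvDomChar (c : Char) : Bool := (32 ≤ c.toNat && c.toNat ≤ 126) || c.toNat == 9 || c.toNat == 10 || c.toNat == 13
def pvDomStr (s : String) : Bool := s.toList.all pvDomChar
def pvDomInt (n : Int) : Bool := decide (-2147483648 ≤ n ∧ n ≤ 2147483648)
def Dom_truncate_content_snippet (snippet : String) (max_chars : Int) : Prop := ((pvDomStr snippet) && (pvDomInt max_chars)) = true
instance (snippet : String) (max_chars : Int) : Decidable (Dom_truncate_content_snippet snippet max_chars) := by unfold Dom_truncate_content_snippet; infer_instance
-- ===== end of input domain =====

-- B replaces A's char-by-char counting loop by three direct find('\n') calls (simpler decomposition; return value only).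


-- ===== PORT A =====
-- A's scan: for i, char in enumerate(snippet): count newlines (break at the 3rd), break once i >= max_chars.
def tcsLoop (mc : Int) (cs : List Char) (i : Int) (nc : Int) : Int :=
  match cs with
  | [] => 0
  | c :: rest =>
    if c = '\n' then
      if nc + 1 ≥ 3 then i
      else if i ≥ mc then i else tcsLoop mc rest (i + 1) (nc + 1)
    else if i ≥ mc then i else tcsLoop mc rest (i + 1) nc

def truncate_content_snippet (snippet : String) (max_chars : Int) : String :=
  if snippet.toList = [] then "" else
  let end_pos := tcsLoop max_chars snippet.toList 0 0
  if end_pos > 0 then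
    String.ofList (PySem.Chars.slice snippet.toList none (some end_pos) ++ "...".toList)
  else if (snippet.toList.length : Int) > max_chars then
    String.ofList (PySem.Chars.slice snippet.toList none (some max_chars) ++ "...".toList)
  else snippet

-- ===== PORT B =====
def truncate_content_snippet_alt (snippet : String) (max_chars : Int) : String :=
  if snippet.toList = [] then "" else
  let cs := snippet.toList
  let p3 : Int :=
    let p1 := PySem.Chars.find cs ['\n']
    if p1 ≠ -1 then
      let p2 := PySem.Chars.findFrom cs ['\n'] (p1 + 1) none
      if p2 ≠ -1 then
        PySem.Chars.findFrom cs ['\n'] (p2 + 1) none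
      else -1
    else -1
  if p3 ≠ -1 ∧ p3 ≤ max_chars then
    String.ofList (PySem.Chars.slice cs none (some p3) ++ "...".toList)
  else if (cs.length : Int) > max_chars then
    String.ofList (PySem.Chars.slice cs none (some max_chars) ++ "...".toList)
  else snippet

-- ===== PRECONDITION & SPEC =====
def Spec_truncate_content_snippet (snippet : String) (max_chars : Int) (out : String) : Prop := out = truncate_content_snippet_alt snippet max_chars
instance (snippet : String) (max_chars : Int) (out : String) : Decidable (Spec_truncate_content_snippet snippet max_chars out) := by unfold Spec_truncate_content_snippet; infer_instance

-- ===== CLAIM (what is proved, stated in full; the proofs are below) =====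
def Claim_equal_truncate_content_snippet : Prop := ∀ (snippet : String) (max_chars : Int), Dom_truncate_content_snippet snippet max_chars → Spec_truncate_content_snippet snippet max_chars (truncate_content_snippet snippet max_chars)

-- ===== LEMMAS AND PROOFS =====

-- position of the k-th newline of cs (0-based), none if there are fewer than k
def pvN : List Char → Nat → Option Nat
  | _, 0 => none
  | [], _ + 1 => none
  | c :: r, k + 1 =>
    if c = '\n' then (if k = 0 then some 0 else (pvN r k).map (· + 1))
    else (pvN r (k + 1)).map (· + 1)

-- where A's loop breaks when the third-newline rule does not fire
def pvTail (mc : Int) (cs : List Char) (i : Int) : Int :=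
  if cs = [] then 0 else if mc ≤ i then i else if mc < i + cs.length then mc else 0

-- closed form of A's loop value (k = newlines still needed)
def pvASpec (mc : Int) (cs : List Char) (i : Int) (k : Nat) : Int :=
  match pvN cs k with
  | some p => if i + (p : Int) ≤ mc then i + p else pvTail mc cs i
  | none => pvTail mc cs i

theorem pvN_lt {cs : List Char} {k p : Nat} (h : pvN cs k = some p) : p < cs.length := by
  induction cs generalizing k p with
  | nil => cases k <;> simp [pvN] at h
  | cons c r ih =>
    cases k with
    | zero => simp [pvN] at h
    | succ k =>
      simp only [pvN] at h
      split_ifs at h with h1 h2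
      · obtain rfl : p = 0 := by simpa using h.symm
        simp
      · obtain ⟨q, hq, rfl⟩ := Option.map_eq_some_iff.mp h
        have := ih hq; simp; omega
      · obtain ⟨q, hq, rfl⟩ := Option.map_eq_some_iff.mp h
        have := ih hq; simp; omega

theorem pvN_ge {cs : List Char} {k p : Nat} (h : pvN cs k = some p) : k ≤ p + 1 := by
  induction cs generalizing k p with
  | nil => cases k <;> simp [pvN] at h
  | cons c r ih =>
    cases k with
    | zero => simp [pvN] at h
    | succ k =>
      simp only [pvN] at h
      split_ifs at h with h1 h2
      · obtain rfl : p = 0 := by simpa using h.symm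
        omega
      · obtain ⟨q, hq, rfl⟩ := Option.map_eq_some_iff.mp h
        have := ih hq; omega
      · obtain ⟨q, hq, rfl⟩ := Option.map_eq_some_iff.mp h
        have := ih hq; omega

theorem pvN_one_some {cs : List Char} {p : Nat} (h : pvN cs 1 = some p) :
    cs[p]? = some '\n' ∧ ∀ i < p, cs[i]? ≠ some '\n' := by
  induction cs generalizing p with
  | nil => simp [pvN] at h
  | cons c r ih =>
    simp only [pvN] at h
    split_ifs at h with h1
    · obtain rfl : p = 0 := by simpa using h.symm
      simp [h1]
    · obtain ⟨q, hq, rfl⟩ := Option.map_eq_some_iff.mp h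
      obtain ⟨hg, hmin⟩ := ih hq
      refine ⟨by simpa using hg, ?_⟩
      intro i hi
      cases i with
      | zero => simpa using fun hc => h1 hc
      | succ i => simpa using hmin i (by omega)

theorem pvN_one_none {cs : List Char} : pvN cs 1 = none ↔ '\n' ∉ cs := by
  induction cs with
  | nil => simp [pvN]
  | cons c r ih =>
    simp only [pvN]
    split_ifs with h1
    · simp [h1]
    · simp only [Option.map_eq_none_iff, ih, List.mem_cons]
      constructor
      · intro hn hor
        rcases hor with hc | hm
        · exact h1 hc.symm
        · exact hn hm
      · intro hn hm
        exact hn (Or.inr hm)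

theorem pvN_chain (cs : List Char) (k : Nat) (hk : 1 ≤ k) :
    pvN cs (k + 1) = (pvN cs k).bind (fun p => (pvN (cs.drop (p + 1)) 1).map (fun q => p + 1 + q)) := by
  induction cs generalizing k with
  | nil => cases k <;> simp [pvN]
  | cons c r ih =>
    cases k with
    | zero => omega
    | succ k =>
      by_cases h1 : c = '\n'
      · simp only [pvN, if_pos h1, if_neg (Nat.succ_ne_zero k)]
        cases k with
        | zero =>
          simp only [List.drop_succ_cons]
          cases hq : pvN r 1 <;> simp [hq] <;> omega
        | succ k =>
          simp only [if_neg (Nat.succ_ne_zero k)]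
          rw [ih (k + 1) (by omega)]
          cases hN : pvN r (k + 1) with
          | none => simp
          | some p =>
            simp only [Option.bind_some, Option.bind_map, List.drop_succ_cons]
            cases hq : pvN (r.drop (p + 1)) 1 <;> simp [hq] <;> omega
      · simp only [pvN, if_neg h1]
        rw [ih (k + 1) (by omega)]
        cases hN : pvN r (k + 1) with
        | none => simp
        | some p =>
          simp only [Option.bind_some, Option.bind_map, List.drop_succ_cons]
          cases hq : pvN (r.drop (p + 1)) 1 <;> simp [hq] <;> omega

theorem pv_sing_prefix (a : Char) (t : List Char) : [a] <+: t ↔ t.head? = some a := by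
  cases t with
  | nil => simp
  | cons b u => simp [List.cons_prefix_cons, eq_comm]

theorem pv_sing_prefix_drop (a : Char) (cs : List Char) (n : Nat) :
    [a] <+: cs.drop n ↔ cs[n]? = some a := by
  rw [pv_sing_prefix, List.head?_drop]

theorem pv_infix_nl (cs : List Char) : ['\n'] <:+: cs ↔ ∃ n : Nat, cs[n]? = some '\n' := by
  constructor
  · intro h
    obtain ⟨j, hj⟩ := (PySem.Chars.exists_prefix_drop_iff_isIn ['\n'] cs).mpr
      ((PySem.Chars.isIn_iff_infix ['\n'] cs).mpr h)
    exact ⟨j, (pv_sing_prefix_drop _ _ _).mp hj⟩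
  · rintro ⟨n, hn⟩
    exact (PySem.Chars.isIn_iff_infix ['\n'] cs).mp
      ((PySem.Chars.exists_prefix_drop_iff_isIn ['\n'] cs).mp ⟨n, (pv_sing_prefix_drop _ _ _).mpr hn⟩)

theorem pv_find_eq (cs : List Char) :
    PySem.Chars.find cs ['\n'] = (match pvN cs 1 with | some q => (q : Int) | none => -1) := by
  cases hN : pvN cs 1 with
  | none =>
    have hnm : '\n' ∉ cs := pvN_one_none.mp hN
    refine (PySem.Chars.find_eq_neg_one_iff cs ['\n']).mpr ?_
    intro hinf
    obtain ⟨n, hn⟩ := (pv_infix_nl cs).mp hinf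
    exact hnm (List.mem_of_getElem? hn)
  | some q =>
    obtain ⟨hg, hmin⟩ := pvN_one_some hN
    have hpos : 0 ≤ PySem.Chars.find cs ['\n'] :=
      (PySem.Chars.find_nonneg_iff cs ['\n']).mpr ((pv_infix_nl cs).mpr ⟨q, hg⟩)
    obtain ⟨hpre, hsp⟩ := PySem.Chars.find_spec hpos
    have hgf : cs[(PySem.Chars.find cs ['\n']).toNat]? = some '\n' :=
      (pv_sing_prefix_drop _ _ _).mp hpre
    have heq : (PySem.Chars.find cs ['\n']).toNat = q := by
      by_contra hne
      rcases Nat.lt_or_ge (PySem.Chars.find cs ['\n']).toNat q with hlt | hge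
      · exact hmin _ hlt hgf
      · exact hsp q (by omega) ((pv_sing_prefix_drop _ _ _).mpr hg)
    simp only []
    omega

theorem pvTail_stop (mc : Int) (c : Char) (r : List Char) (i : Int) (hm : mc ≤ i) :
    pvTail mc (c :: r) i = i := by
  simp [pvTail, hm]

theorem pvTail_cons (mc : Int) (c : Char) (r : List Char) (i : Int) (hm : ¬ mc ≤ i) :
    pvTail mc (c :: r) i = pvTail mc r (i + 1) := by
  cases r with
  | nil =>
    simp only [pvTail, List.length_cons, List.length_nil]
    split_ifs <;> simp_all <;> omega
  | cons d u =>
    simp only [pvTail, List.length_cons]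
    split_ifs <;> simp_all <;> omega

theorem pv_stop (mc : Int) (c : Char) (r : List Char) (i : Int) (k : Nat) (hm : mc ≤ i) :
    pvASpec mc (c :: r) i k = i := by
  unfold pvASpec
  cases hN : pvN (c :: r) k with
  | none => exact pvTail_stop mc c r i hm
  | some p =>
    simp only []
    split_ifs with hle
    · omega
    · exact pvTail_stop mc c r i hm

theorem pv_first (mc : Int) (c : Char) (r : List Char) (i : Int) (k : Nat)
    (hN : pvN (c :: r) k = some 0) : pvASpec mc (c :: r) i k = i := by
  unfold pvASpec
  rw [hN]
  simp only [Nat.cast_zero, add_zero]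
  split_ifs with hle
  · rfl
  · exact pvTail_stop mc c r i (by omega)

theorem pv_step (mc : Int) (c : Char) (r : List Char) (i : Int) (k k' : Nat)
    (hpn : pvN (c :: r) k = (pvN r k').map (· + 1)) (hm : ¬ mc ≤ i) :
    pvASpec mc (c :: r) i k = pvASpec mc r (i + 1) k' := by
  unfold pvASpec
  rw [hpn]
  cases hN : pvN r k' with
  | none => simp only [Option.map_none]; exact pvTail_cons mc c r i hm
  | some p =>
    simp only [Option.map_some]
    have hcond : (i + ((p : Int) + 1) ≤ mc) ↔ (i + 1 + (p : Int) ≤ mc) := by omega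
    push_cast
    split_ifs with h1 h2 h2
    · omega
    · omega
    · omega
    · exact pvTail_cons mc c r i hm

theorem pv_loop_eq (mc : Int) (cs : List Char) :
    ∀ (i : Int) (k : Nat), 1 ≤ k → k ≤ 3 →
      tcsLoop mc cs i (3 - (k : Int)) = pvASpec mc cs i k := by
  induction cs with
  | nil =>
    intro i k h1 h3
    have : pvN [] k = none := by cases k <;> simp [pvN]
    simp [tcsLoop, pvASpec, this, pvTail]
  | cons c r ih =>
    intro i k h1 h3
    by_cases hnl : c = '\n'
    · by_cases hk1 : k = 1
      · subst hk1
        have hN : pvN (c :: r) 1 = some 0 := by simp [pvN, hnl]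
        rw [pv_first mc c r i 1 hN]
        simp only [tcsLoop, if_pos hnl]
        norm_num
      · -- k = 2 or 3: the third newline is not this one
        have hk2 : 2 ≤ k := by omega
        have hcond : ¬ (3 - (k : Int) + 1 ≥ 3) := by omega
        simp only [tcsLoop, if_pos hnl, if_neg hcond]
        have hpn : pvN (c :: r) k = (pvN r (k - 1)).map (· + 1) := by
          obtain ⟨k', rfl⟩ : ∃ k', k = k' + 1 := ⟨k - 1, by omega⟩
          have hk' : ¬ k' = 0 := by omega
          simp [pvN, hnl, hk']
        by_cases hm : mc ≤ i
        · rw [if_pos (by omega : i ≥ mc), pv_stop mc c r i k hm]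
        · rw [if_neg (by omega : ¬ i ≥ mc)]
          have harg : 3 - (k : Int) + 1 = 3 - ((k - 1 : Nat) : Int) := by
            push_cast [Nat.cast_sub (by omega : 1 ≤ k)]; omega
          rw [harg, ih (i + 1) (k - 1) (by omega) (by omega)]
          exact (pv_step mc c r i k (k - 1) hpn hm).symm
    · have hpn : pvN (c :: r) k = (pvN r k).map (· + 1) := by
        obtain ⟨k', rfl⟩ : ∃ k', k = k' + 1 := ⟨k - 1, by omega⟩
        simp [pvN, hnl]
      simp only [tcsLoop, if_neg hnl]
      by_cases hm : mc ≤ i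
      · rw [if_pos (by omega : i ≥ mc), pv_stop mc c r i k hm]
      · rw [if_neg (by omega : ¬ i ≥ mc), ih (i + 1) k h1 h3]
        exact (pv_step mc c r i k k hpn hm).symm

-- the three chained find() calls of B compute the third-newline position
theorem pv_chain3 (cs : List Char) :
    (if PySem.Chars.find cs ['\n'] ≠ -1 then
       (if PySem.Chars.findFrom cs ['\n'] (PySem.Chars.find cs ['\n'] + 1) none ≠ -1 then
          PySem.Chars.findFrom cs ['\n']
            (PySem.Chars.findFrom cs ['\n'] (PySem.Chars.find cs ['\n'] + 1) none + 1) none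
        else -1)
     else -1)
    = (match pvN cs 3 with | some p => (p : Int) | none => -1) := by
  cases hN1 : pvN cs 1 with
  | none =>
    have h2 : pvN cs 2 = none := by rw [pvN_chain cs 1 (by omega), hN1]; rfl
    have h3 : pvN cs 3 = none := by rw [pvN_chain cs 2 (by omega), h2]; rfl
    have hf : PySem.Chars.find cs ['\n'] = -1 := by rw [pv_find_eq, hN1]
    simp [hf, h3]
  | some q1 =>
    have hq1 : q1 < cs.length := pvN_lt hN1
    have hf1 : PySem.Chars.find cs ['\n'] = (q1 : Int) := by rw [pv_find_eq, hN1]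
    have h2 : pvN cs 2 = (pvN (cs.drop (q1 + 1)) 1).map (fun q => q1 + 1 + q) := by
      rw [pvN_chain cs 1 (by omega), hN1]; rfl
    have hff1 : PySem.Chars.findFrom cs ['\n'] ((q1 : Int) + 1) none
        = (match pvN cs 2 with | some q => (q : Int) | none => -1) := by
      have harg1 : (q1 : Int) + 1 = ((q1 + 1 : Nat) : Int) := by push_cast; ring
      rw [harg1, PySem.Chars.findFrom_natCast cs ['\n'] (q1 + 1) (by omega),
        pv_find_eq (cs.drop (q1 + 1))]
      cases hd1 : pvN (cs.drop (q1 + 1)) 1 with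
      | none =>
        have h2' : pvN cs 2 = none := by rw [h2, hd1]; rfl
        simp [h2']
      | some q2' =>
        have h2' : pvN cs 2 = some (q1 + 1 + q2') := by rw [h2, hd1]; rfl
        simp only [h2']
        rw [if_neg (by omega : ¬ ((q2' : Nat) : Int) = -1)]
        push_cast; ring
    cases hN2 : pvN cs 2 with
    | none =>
      have h3 : pvN cs 3 = none := by rw [pvN_chain cs 2 (by omega), hN2]; rfl
      simp only [hN2] at hff1
      rw [hf1, if_pos (by omega : ((q1 : Nat) : Int) ≠ -1), hff1]
      simp [h3]
    | some q2 =>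
      have hq2 : q2 < cs.length := pvN_lt hN2
      have h3 : pvN cs 3 = (pvN (cs.drop (q2 + 1)) 1).map (fun q => q2 + 1 + q) := by
        rw [pvN_chain cs 2 (by omega), hN2]; rfl
      have hff2 : PySem.Chars.findFrom cs ['\n'] ((q2 : Int) + 1) none
          = (match pvN cs 3 with | some q => (q : Int) | none => -1) := by
        have harg2 : (q2 : Int) + 1 = ((q2 + 1 : Nat) : Int) := by push_cast; ring
        rw [harg2, PySem.Chars.findFrom_natCast cs ['\n'] (q2 + 1) (by omega),
          pv_find_eq (cs.drop (q2 + 1))]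
        cases hd2 : pvN (cs.drop (q2 + 1)) 1 with
        | none =>
          have h3' : pvN cs 3 = none := by rw [h3, hd2]; rfl
          simp [h3']
        | some q3' =>
          have h3' : pvN cs 3 = some (q2 + 1 + q3') := by rw [h3, hd2]; rfl
          simp only [h3']
          rw [if_neg (by omega : ¬ ((q3' : Nat) : Int) = -1)]
          push_cast; ring
      simp only [hN2] at hff1
      rw [hf1, if_pos (by omega : ((q1 : Nat) : Int) ≠ -1), hff1,
        if_pos (by omega : ((q2 : Nat) : Int) ≠ -1), hff2]

-- ===== VERDICT (by name: the statement is the Claim_ definition above) =====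
theorem truncate_content_snippet_spec : Claim_equal_truncate_content_snippet := by
  intro snippet mc _hdom
  unfold Spec_truncate_content_snippet
  simp only [truncate_content_snippet, truncate_content_snippet_alt]
  by_cases hnil : snippet.toList = []
  · simp [hnil]
  · simp only [if_neg hnil]
    have hA : tcsLoop mc snippet.toList 0 0 = pvASpec mc snippet.toList 0 3 := by
      have := pv_loop_eq mc snippet.toList 0 3 (by omega) (by omega)
      simpa using this
    have hB := pv_chain3 snippet.toList
    rw [hB, hA]
    set cs := snippet.toList with hcs
    have htail : pvTail mc cs 0 = if mc ≤ 0 then 0 else if mc < (cs.length : Int) then mc else 0 := by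
      simp [pvTail, hnil]
    cases hN3 : pvN cs 3 with
    | none =>
      simp only [pvASpec, hN3, htail]
      rw [if_neg (by omega : ¬ ((-1 : Int) ≠ -1 ∧ (-1 : Int) ≤ mc))]
      by_cases hm0 : mc ≤ 0
      · rw [if_pos hm0, if_neg (by omega : ¬ (0 : Int) > 0)]
      · rw [if_neg hm0]
        by_cases hlen : mc < (cs.length : Int)
        · rw [if_pos hlen, if_pos (by omega : mc > 0), if_pos (by omega : (cs.length : Int) > mc)]
        · rw [if_neg hlen, if_neg (by omega : ¬ (0 : Int) > 0)]
    | some p =>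
      have hp2 : 2 ≤ p := by have := pvN_ge hN3; omega
      have hplen : p < cs.length := pvN_lt hN3
      simp only [pvASpec, hN3]
      by_cases hple : (p : Int) ≤ mc
      · rw [if_pos (by omega : (0 : Int) + (p : Int) ≤ mc),
          if_pos (by omega : (0 : Int) + (p : Int) > 0),
          if_pos (⟨by omega, hple⟩ : (p : Int) ≠ -1 ∧ (p : Int) ≤ mc)]
        norm_num
      · rw [if_neg (by omega : ¬ (0 : Int) + (p : Int) ≤ mc),
          if_neg (by omega : ¬ ((p : Int) ≠ -1 ∧ (p : Int) ≤ mc)), htail]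
        by_cases hm0 : mc ≤ 0
        · rw [if_pos hm0, if_neg (by omega : ¬ (0 : Int) > 0)]
        · rw [if_neg hm0]
          by_cases hlen : mc < (cs.length : Int)
          · rw [if_pos hlen, if_pos (by omega : mc > 0), if_pos (by omega : (cs.length : Int) > mc)]
          · rw [if_neg hlen, if_neg (by omega : ¬ (0 : Int) > 0)]
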